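-- pv_equiv track=rewrite | github.com/rgkbitw/Prior2 | Scripts/utils.py | isBug
-- ===== SOURCE A (Python) =====
-- def isBug(title, labels):
--     label_str = ''
--     for l in labels:
--         label_str += l['name'] + ' '
--     label_str += ' ' + title
--     if 'bug' in label_str:
--         return True
--     else:
--         return False
-- ===== SOURCE B (Python) =====
-- def isBug(title, labels):
--     for l in labels:
--         if 'bug' in l['name']:
--             return True
--     return 'bug' in title
-- ===== Notes on version B (the rewrite author's own statement) =====
-- stated objective: simpler
-- what changed: Instead of concatenating all label names and the title into one space-joined string and doing a single substring search, B scans each label name independently with early return and finally tests the title; equivalent because the pieces are space-separated and 'bug' contains no space.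
import Mathlib
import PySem

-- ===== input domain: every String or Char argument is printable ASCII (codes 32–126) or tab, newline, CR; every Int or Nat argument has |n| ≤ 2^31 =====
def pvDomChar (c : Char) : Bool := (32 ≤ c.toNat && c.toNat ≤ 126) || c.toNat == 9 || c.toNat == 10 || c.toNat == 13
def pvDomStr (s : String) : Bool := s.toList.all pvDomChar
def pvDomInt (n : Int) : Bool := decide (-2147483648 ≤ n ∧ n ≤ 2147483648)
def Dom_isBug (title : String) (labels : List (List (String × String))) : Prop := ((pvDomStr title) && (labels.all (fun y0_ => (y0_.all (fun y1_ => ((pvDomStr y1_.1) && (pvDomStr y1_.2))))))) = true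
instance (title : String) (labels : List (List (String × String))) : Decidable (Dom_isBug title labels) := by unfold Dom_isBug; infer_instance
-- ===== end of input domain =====

-- B replaces A's build-one-big-string-then-search with a per-piece short-circuit scan (simpler);
-- equivalent because the pieces are space-joined and "bug" contains no space.


-- ===== PORT A =====
-- l['name'] raises KeyError when absent; Pre_ excludes that, so getD's default is never used inside Pre_.
def isBug (title : String) (labels : List (List (String × String))) : Bool :=
  let label_str := labels.foldl (fun s l => s ++ (PySem.Dict.mk l).getD "name" "" ++ " ") ""
  let label_str := label_str ++ " " ++ title
  if PySem.Str.isIn "bug" label_str then true else false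

-- ===== PORT B =====
def isBugGo (title : String) : List (List (String × String)) → Bool
  | [] => PySem.Str.isIn "bug" title
  | l :: rest =>
      if PySem.Str.isIn "bug" ((PySem.Dict.mk l).getD "name" "") then true
      else isBugGo title rest

def isBug_alt (title : String) (labels : List (List (String × String))) : Bool :=
  isBugGo title labels

-- ===== PRECONDITION & SPEC =====
-- Pre_ excludes exactly the inputs where Python A raises KeyError: some label dict lacks the key "name".
def Pre_isBug (title : String) (labels : List (List (String × String))) : Prop :=
  (labels.all (fun l => l.any (fun p => p.1 == "name"))) = true
instance (title : String) (labels : List (List (String × String))) : Decidable (Pre_isBug title labels) := by unfold Pre_isBug; infer_instance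
def pvWitness_isBug : String × (List (List (String × String))) := ("fix a bug", [[("name", "critical")], [("name", "bugfix")]])

def Spec_isBug (title : String) (labels : List (List (String × String))) (out : Bool) : Prop := out = isBug_alt title labels
instance (title : String) (labels : List (List (String × String))) (out : Bool) : Decidable (Spec_isBug title labels out) := by unfold Spec_isBug; infer_instance

-- ===== CLAIM (what is proved, stated in full; the proofs are below) =====
def Claim_equal_isBug : Prop := ∀ (title : String) (labels : List (List (String × String))), Dom_isBug title labels → Pre_isBug title labels → Spec_isBug title labels (isBug title labels)

-- ===== LEMMAS AND PROOFS =====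

-- a nonempty pattern avoiding c never straddles the separator c: prefix form
theorem prefix_append_sep {c : Char} {sub a b : List Char} (hc : c ∉ sub) :
    sub <+: a ++ c :: b ↔ sub <+: a := by
  induction sub generalizing a with
  | nil => simp
  | cons s ss ih =>
    cases a with
    | nil =>
      simp only [List.nil_append, List.cons_prefix_cons]
      constructor
      · rintro ⟨rfl, -⟩; exact absurd (List.mem_cons_self) hc
      · intro h; exact absurd h (by simp)
    | cons x xs =>
      simp only [List.cons_append, List.cons_prefix_cons]
      constructor
      · rintro ⟨rfl, h⟩; exact ⟨rfl, (ih (fun hm => hc (List.mem_cons_of_mem _ hm))).1 h⟩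
      · rintro ⟨rfl, h⟩; exact ⟨rfl, (ih (fun hm => hc (List.mem_cons_of_mem _ hm))).2 h⟩

-- a nonempty pattern avoiding c occurs in a ++ c :: b iff it occurs in a or in b
theorem infix_append_sep {c : Char} {sub a b : List Char} (hc : c ∉ sub) (hne : sub ≠ []) :
    sub <:+: a ++ c :: b ↔ sub <:+: a ∨ sub <:+: b := by
  induction a with
  | nil =>
    simp only [List.nil_append, List.infix_cons_iff]
    rw [show (c :: b) = [] ++ c :: b from rfl, prefix_append_sep hc]
    simp [List.prefix_nil, hne]
  | cons x xs ih =>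
    rw [List.cons_append, List.infix_cons_iff, List.infix_cons_iff,
      show x :: (xs ++ c :: b) = (x :: xs) ++ c :: b from rfl, prefix_append_sep hc, ih]
    tauto

theorem space_not_mem_bug : (' ' : Char) ∉ (['b','u','g'] : List Char) := by decide
theorem bug_ne_nil : (['b','u','g'] : List Char) ≠ [] := by decide

-- A's foldl peels off the accumulator
theorem foldA_acc (labels : List (List (String × String))) (acc : String) :
    labels.foldl (fun s l => s ++ (PySem.Dict.mk l).getD "name" "" ++ " ") acc
      = acc ++ labels.foldl (fun s l => s ++ (PySem.Dict.mk l).getD "name" "" ++ " ") "" := by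
  induction labels generalizing acc with
  | nil => simp
  | cons l rest ih =>
    simp only [List.foldl_cons]
    rw [ih (acc ++ _ ++ _), ih ("" ++ _ ++ _)]
    simp [String.append_assoc]

-- main loop correspondence, stated over the char lists
theorem main_lemma (title : String) (labels : List (List (String × String))) :
    ((['b','u','g'] : List Char) <:+: (labels.foldl (fun s l => s ++ (PySem.Dict.mk l).getD "name" "" ++ " ") "").toList ++ ' ' :: title.toList)
      ↔ isBugGo title labels = true := by
  induction labels with
  | nil =>
    simp only [List.foldl_nil, isBugGo]
    rw [show ((("" : String)).toList ++ ' ' :: title.toList) = [] ++ ' ' :: title.toList by simp,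
      infix_append_sep space_not_mem_bug bug_ne_nil]
    simp [PySem.Chars.isIn_iff_infix]
  | cons l rest ih =>
    simp only [List.foldl_cons, isBugGo]
    rw [foldA_acc rest]
    have h1 : (("" ++ (PySem.Dict.mk l).getD "name" "" ++ " " ++
        rest.foldl (fun s l => s ++ (PySem.Dict.mk l).getD "name" "" ++ " ") "").toList ++ ' ' :: title.toList)
        = ((PySem.Dict.mk l).getD "name" "").toList ++ ' ' ::
          ((rest.foldl (fun s l => s ++ (PySem.Dict.mk l).getD "name" "" ++ " ") "").toList ++ ' ' :: title.toList) := by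
      simp [String.toList_append]
    rw [h1, infix_append_sep space_not_mem_bug bug_ne_nil, ih,
      ← PySem.Chars.isIn_iff_infix]
    cases hb : PySem.Chars.isIn ['b','u','g'] ((PySem.Dict.mk l).getD "name" "").toList with
    | true => simp [hb]
    | false => simp [hb]

-- ===== VERDICT (by name: the statement is the Claim_ definition above) =====
theorem isBug_spec : Claim_equal_isBug := by
  intro title labels _ _
  unfold Spec_isBug isBug isBug_alt
  have hstr : PySem.Str.isIn "bug"
      (labels.foldl (fun s l => s ++ (PySem.Dict.mk l).getD "name" "" ++ " ") "" ++ " " ++ title)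
      = isBugGo title labels := by
    rw [Bool.eq_iff_iff, PySem.Str.isIn_iff_infix,
      show ("bug".toList : List Char) = ['b','u','g'] from rfl,
      show ((labels.foldl (fun s l => s ++ (PySem.Dict.mk l).getD "name" "" ++ " ") "" ++ " " ++ title).toList)
        = (labels.foldl (fun s l => s ++ (PySem.Dict.mk l).getD "name" "" ++ " ") "").toList ++ ' ' :: title.toList
        by simp [String.toList_append]]
    exact main_lemma title labels
  simp only [hstr]
  cases isBugGo title labels <;> simp
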